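-- pv_equiv track=rewrite | github.com/lllcho/CAPTCHA-breaking | util.py | words_simmilar_score2
-- ===== SOURCE A (Python) =====
-- def word_simialr_score2(s1, s2):
--     score = len(set(list(s1)) & set(list(s2)))
--     return score
--
-- def words_simmilar_score2(word, words):
--     word_score = {}
--     for Word in words:
--         ws = word_simialr_score2(word, Word)
--         if ws not in word_score.keys():
--             word_score[ws] = [Word]
--         else:
--             word_score[ws].append(Word)
--     return word_score
-- ===== SOURCE B (Python) =====
-- def word_simialr_score2(s1, s2):
--     score = len(set(list(s1)) & set(list(s2)))
--     return score
--
-- def words_simmilar_score2(word, words):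
--     # two-pass: score every word once, then bucket by the distinct scores
--     scores = [word_simialr_score2(word, w) for w in words]
--     return {s: [w for w, sc in zip(words, scores) if sc == s]
--             for s in dict.fromkeys(scores)}
-- ===== Notes on version B (the rewrite author's own statement) =====
-- stated objective: alternative
-- what changed: Replaces A's incremental dict-insert/append loop by a two-pass build: compute the list of scores once, then bucket the words under the distinct scores (dict.fromkeys order) with a comprehension.
import Mathlib
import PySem

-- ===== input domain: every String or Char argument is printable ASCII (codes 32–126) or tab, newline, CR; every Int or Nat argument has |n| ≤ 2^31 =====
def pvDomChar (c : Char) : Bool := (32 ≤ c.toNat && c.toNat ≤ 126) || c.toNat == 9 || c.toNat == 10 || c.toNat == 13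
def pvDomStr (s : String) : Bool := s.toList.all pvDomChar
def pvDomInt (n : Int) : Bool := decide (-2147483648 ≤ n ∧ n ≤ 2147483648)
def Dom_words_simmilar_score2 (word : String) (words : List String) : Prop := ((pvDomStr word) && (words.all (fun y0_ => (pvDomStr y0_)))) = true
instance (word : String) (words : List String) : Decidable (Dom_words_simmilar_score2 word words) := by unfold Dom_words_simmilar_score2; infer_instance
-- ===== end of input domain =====

-- B replaces A's incremental dict-insert/append loop by a two-pass build (score list, then
-- bucket under the distinct scores); same result, alternative decomposition, no speed claim.

-- ===== PORT A =====
-- helper word_simialr_score2: len(set(list(s1)) & set(list(s2)))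
def word_simialr_score2_port (s1 s2 : String) : Int :=
  PySem.Set.len (PySem.Set.inter (PySem.Set.ofList s1.toList) (PySem.Set.ofList s2.toList))

def words_simmilar_score2 (word : String) (words : List String) : List (Int × List String) :=
  (words.foldl (fun d W =>
      let ws := word_simialr_score2_port word W
      if d.contains ws = false then d.insert ws [W]
      else d.insert ws (d.getD ws [] ++ [W]))
    PySem.Dict.empty).items

-- ===== PORT B =====
def words_simmilar_score2_alt (word : String) (words : List String) : List (Int × List String) :=
  let scores := words.map (fun w => word_simialr_score2_port word w)
  (PySem.List.dedup scores).map (fun s =>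
    (s, ((words.zip scores).filter (fun p => p.2 == s)).map (fun p => p.1)))

-- ===== PRECONDITION & SPEC =====
def Spec_words_simmilar_score2 (word : String) (words : List String) (out : List (Int × List String)) : Prop := out = words_simmilar_score2_alt word words
instance (word : String) (words : List String) (out : List (Int × List String)) : Decidable (Spec_words_simmilar_score2 word words out) := by unfold Spec_words_simmilar_score2; infer_instance

-- ===== CLAIM (what is proved, stated in full; the proofs are below) =====
def Claim_equal_words_simmilar_score2 : Prop := ∀ (word : String) (words : List String), Dom_words_simmilar_score2 word words → Spec_words_simmilar_score2 word words (words_simmilar_score2 word words)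

-- ===== LEMMAS AND PROOFS =====

-- A's loop body is exactly Dict.modify with default []
theorem pvStepA_eq_modify (word : String) :
    (fun (d : PySem.Dict Int (List String)) (W : String) =>
      let ws := word_simialr_score2_port word W
      if d.contains ws = false then d.insert ws [W]
      else d.insert ws (d.getD ws [] ++ [W]))
    = (fun d W => d.modify (word_simialr_score2_port word W) [] (fun v => v ++ [W])) := by
  funext d W
  by_cases h : d.contains (word_simialr_score2_port word W) = true
  · simp [h, PySem.Dict.modify]
  · simp only [Bool.not_eq_true] at h
    simp [h, PySem.Dict.modify, PySem.Dict.getD, (PySem.Dict.get?_eq_none_iff_contains d _).mpr h]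

theorem pv_zip_filter (key : String → Int) (s : Int) (ws : List String) :
    ((ws.map (fun W => (key W, W))).filter (fun p => p.1 == s)).map (fun p => p.2)
      = ((ws.zip (ws.map key)).filter (fun p => p.2 == s)).map (fun p => p.1) := by
  induction ws with
  | nil => rfl
  | cons w t ih =>
      by_cases h : key w == s <;> simp [h, ih]

-- ===== VERDICT (by name: the statement is the Claim_ definition above) =====
theorem words_simmilar_score2_spec : Claim_equal_words_simmilar_score2 := by
  intro word words _
  show words_simmilar_score2 word words = words_simmilar_score2_alt word words
  unfold words_simmilar_score2 words_simmilar_score2_alt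
  rw [pvStepA_eq_modify word]
  have hnd : (words.foldl (fun d W => d.modify (word_simialr_score2_port word W) [] (fun v => v ++ [W])) PySem.Dict.empty).keys.Nodup :=
    PySem.Dict.nodup_keys_foldl_modify_key words (fun W => word_simialr_score2_port word W)
      [] (fun _ W v => v ++ [W]) PySem.Dict.empty (by simp [PySem.Dict.empty, PySem.Dict.keys])
  rw [PySem.Dict.items_eq_map_keys _ hnd []]
  rw [PySem.Dict.keys_foldl_modify_key words (fun W => word_simialr_score2_port word W)
      [] (fun _ W v => v ++ [W]) PySem.Dict.empty]
  show _ = (PySem.List.dedup (words.map (fun w => word_simialr_score2_port word w))).map (fun s =>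
    (s, ((words.zip (words.map (fun w => word_simialr_score2_port word w))).filter (fun p => p.2 == s)).map (fun p => p.1)))
  have hkeys : PySem.Set.update (PySem.Dict.keys (PySem.Dict.empty : PySem.Dict Int (List String)))
      (words.map (fun W => word_simialr_score2_port word W))
      = PySem.List.dedup (words.map (fun w => word_simialr_score2_port word w)) := by
    simp [PySem.Set.update, PySem.Set.ofList_eq_foldl, PySem.Dict.empty, PySem.Dict.keys]
  rw [hkeys]
  apply List.map_congr_left
  intro s _
  have hfold : words.foldl (fun d W => d.modify (word_simialr_score2_port word W) [] (fun v => v ++ [W])) PySem.Dict.empty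
      = (words.map (fun W => (word_simialr_score2_port word W, W))).foldl
          (fun d p => d.modify p.1 [] (fun v => v ++ [p.2])) PySem.Dict.empty := by
    rw [List.foldl_map]
  rw [hfold, PySem.Dict.getD_foldl_modify_append]
  simp [pv_zip_filter (fun w => word_simialr_score2_port word w) s words]
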